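-- pv_equiv track=rewrite | github.com/MuhamadAlee/Google_News_Modifier | main.py | time_comparison
-- ===== SOURCE A (Python) =====
-- def time_comparison(times):
--     timestamps=['sec','min','hour','day','week','month']
--     flag=False
--     last=""
--     ind=-1
--     for ts in timestamps:
--         for index,date in enumerate(times):
--             if (ts in date) or (ts+'s' in date):
--                 val=int(date.split(' ')[0])
--                 if (last=="") or (last>val):
--                     flag=True
--                     ind=index
--                     last=val
--         if (flag):
--             break
--     return ind
-- ===== SOURCE B (Python) =====
-- def time_comparison(times):
--     # Date-major reformulation: label every date with the priority rank of the best
--     # unit named in it, take the best rank present, then pick the index with the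
--     # smallest leading number among the dates carrying that rank.
--     # ('u' in d already covers "u + 's'" in d, so one membership test per unit suffices.)
--     units = ['sec', 'min', 'hour', 'day', 'week', 'month']
--     ranks = [next((r for r, u in enumerate(units) if u in d), len(units)) for d in times]
--     top = min(ranks, default=len(units))
--     if top == len(units):
--         return -1
--     return min((i for i in range(len(times)) if ranks[i] == top),
--                key=lambda i: int(times[i].split(' ')[0]))
-- ===== Notes on version B (the rewrite author's own statement) =====
-- stated objective: alternative
-- what changed: A's unit-major priority loop with manual flag/last/ind min-tracking and break is replaced by a date-major reformulation: every date is labelled with the rank of its best unit (one membership test per unit, dropping A's redundant u+'s' test), the minimum rank present is taken, and the answer is the first value-minimal index among dates of that rank.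
import Mathlib
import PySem

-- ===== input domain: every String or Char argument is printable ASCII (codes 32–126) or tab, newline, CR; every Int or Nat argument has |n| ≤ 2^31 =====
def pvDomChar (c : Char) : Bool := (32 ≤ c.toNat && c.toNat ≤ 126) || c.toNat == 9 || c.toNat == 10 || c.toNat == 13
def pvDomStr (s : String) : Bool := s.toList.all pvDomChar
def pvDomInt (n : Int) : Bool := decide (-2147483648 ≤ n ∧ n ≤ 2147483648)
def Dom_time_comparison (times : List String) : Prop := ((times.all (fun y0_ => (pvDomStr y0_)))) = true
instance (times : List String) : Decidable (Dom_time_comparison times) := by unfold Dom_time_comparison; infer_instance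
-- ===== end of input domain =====

-- B replaces A's unit-major priority loop (manual flag/last/ind state, break) by a date-major
-- reformulation: rank every date by its best unit, take the minimum rank, argmin the value
-- among dates of that rank (objective: alternative decomposition).

-- ===== PORT A =====
-- val = int(date.split(' ')[0]); the ValueError case (non-int first token of a matching date
-- at the winning unit) is excluded by Pre_, and defaulted to 0 outside it.
def pvAVal (d : String) : Int :=
  (PySem.Int.ofStr? (((PySem.Str.split? d " ").getD []).headD "")).getD 0

-- one inner-loop step over (index, date); state = (flag, last, ind), last = none models last == ""
def pvAStep (ts : String) (st : Bool × Option Int × Int) (p : Int × String) :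
    Bool × Option Int × Int :=
  if PySem.Str.isIn ts p.2 || PySem.Str.isIn (ts ++ "s") p.2 then
    let val := pvAVal p.2
    match st.2.1 with
    | none => (true, some val, p.1)
    | some last => if last > val then (true, some val, p.1) else st
  else st

-- outer loop over the unit list, breaking when flag is set
def pvALoop (times : List String) : List String → (Bool × Option Int × Int) → Int
  | [], st => st.2.2
  | ts :: rest, st =>
    let st' := (PySem.List.enumerate times).foldl (pvAStep ts) st
    if st'.1 then st'.2.2 else pvALoop times rest st'

def time_comparison (times : List String) : Int :=
  pvALoop times ["sec", "min", "hour", "day", "week", "month"] (false, none, -1)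

-- ===== PORT B =====
-- rank of a date = next((r for r, u in enumerate(units) if u in d), len(units))
def pvRank (d : String) : Int :=
  ((((PySem.List.enumerate ["sec", "min", "hour", "day", "week", "month"]).find?
      (fun p => PySem.Str.isIn p.2 d)).map (fun p => p.1)).getD 6)

-- key = int(times[i].split(' ')[0]); same default-outside-Pre_ as A's pvAVal
def pvBKey (times : List String) (i : Int) : Int :=
  (PySem.Int.ofStr? (((PySem.Str.split? (PySem.List.pyGetD times i "") " ").getD []).headD "")).getD 0

def time_comparison_alt (times : List String) : Int :=
  let ranks := times.map pvRank
  let top := PySem.List.minD ranks (fun r => r) 6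
  if top == (6 : Int) then -1
  else
    match PySem.List.min?
        ((PySem.List.pyRange 0 (PySem.List.len times) 1).filter
          (fun i => PySem.List.pyGetD ranks i 6 == top))
        (pvBKey times) with
    | some i => i
    | none => -1   -- unreachable: top < 6 forces a date of rank top (min() never sees an empty sequence)

-- ===== PRECONDITION & SPEC =====
-- Pre_ excludes exactly the inputs on which Python A raises ValueError: those where some date
-- matching the first (highest-priority) matching unit has a non-integer first space-token.
def pvPreMatch (u d : String) : Bool :=
  PySem.Str.isIn u d || PySem.Str.isIn (u ++ "s") d

def pvPreParses (d : String) : Bool :=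
  (PySem.Int.ofStr? (((PySem.Str.split? d " ").getD []).headD "")).isSome

def Pre_time_comparison (times : List String) : Prop :=
  (match ["sec", "min", "hour", "day", "week", "month"].find?
      (fun u => times.any (pvPreMatch u)) with
   | none => true
   | some u => times.all (fun d => !pvPreMatch u d || pvPreParses d)) = true

instance (times : List String) : Decidable (Pre_time_comparison times) := by
  unfold Pre_time_comparison; infer_instance

def pvWitness_time_comparison : List String := ["5 mins", "3 secs"]

def Spec_time_comparison (times : List String) (out : Int) : Prop := out = time_comparison_alt times
instance (times : List String) (out : Int) : Decidable (Spec_time_comparison times out) := by unfold Spec_time_comparison; infer_instance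

-- ===== CLAIM (what is proved, stated in full; the proofs are below) =====
def Claim_equal_time_comparison : Prop := ∀ (times : List String), Dom_time_comparison times → Pre_time_comparison times → Spec_time_comparison times (time_comparison times)

-- ===== LEMMAS AND PROOFS =====

-- a unit substring test: 'isIn (u ++ "s") d' implies 'isIn u d', so A's disjunction collapses
theorem pvMatchEq (u d : String) :
    (PySem.Str.isIn u d || PySem.Str.isIn (u ++ "s") d) = PySem.Str.isIn u d := by
  cases h : PySem.Str.isIn u d with
  | true => simp [h]
  | false =>
    simp only [h, Bool.false_or]
    by_contra hs
    have hs' : PySem.Str.isIn (u ++ "s") d = true := by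
      cases hq : PySem.Str.isIn (u ++ "s") d with
      | true => rfl
      | false => exact absurd hq hs
    have hinf : (u ++ "s").toList <:+: d.toList := (PySem.Str.isIn_iff_infix _ _).1 hs'
    have hpre : u.toList <+: (u ++ "s").toList := by
      rw [String.toList_append]; exact List.prefix_append _ _
    have : u.toList <:+: d.toList := hpre.isInfix.trans hinf
    rw [(PySem.Str.isIn_iff_infix _ _).2 this] at h
    simp at h

-- the body of PySem.List.min?'s fold, named so it can be reasoned about
def pvMinStep (key : (Int × String) → Int) (acc : Option (Int × String)) (x : Int × String) :
    Option (Int × String) :=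
  match acc with
  | none => some x
  | some m => if key x < key m then some x else some m

def pvKey : Int × String → Int := fun p => pvAVal p.2

-- A's loop state viewed as "current best matching pair, if any"
def pvG : Option (Int × String) → Bool × Option Int × Int
  | none => (false, none, -1)
  | some m => (true, some (pvKey m), m.1)

set_option maxHeartbeats 1000000 in
theorem pvInner_gen (ts : String) (ps : List (Int × String)) :
    ∀ acc, ps.foldl (pvAStep ts) (pvG acc) =
      pvG ((ps.filter (fun p => PySem.Str.isIn ts p.2)).foldl (pvMinStep pvKey) acc) := by
  induction ps with
  | nil => intro acc; rfl
  | cons p t ih =>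
    intro acc
    obtain ⟨i, d⟩ := p
    by_cases hm : PySem.Str.isIn ts d = true
    · have hm' : (PySem.Str.isIn ts d || PySem.Str.isIn (ts ++ "s") d) = true := by
        rw [pvMatchEq]; exact hm
      have hf : ((i, d) :: t).filter (fun p => PySem.Str.isIn ts p.2) =
          (i, d) :: t.filter (fun p => PySem.Str.isIn ts p.2) := by
        simp only [List.filter_cons]; rw [hm]; rfl
      rw [hf]
      cases acc with
      | none =>
        have hs : pvAStep ts (pvG none) (i, d) = pvG (some (i, d)) := by
          unfold pvAStep; rw [hm']; rfl
        rw [List.foldl_cons, hs, ih (some (i, d))]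
        rfl
      | some m =>
        by_cases hlt : pvKey (i, d) < pvKey m
        · have hlt' : pvKey m > pvAVal d := hlt
          have hs : pvAStep ts (pvG (some m)) (i, d) = pvG (some (i, d)) := by
            unfold pvAStep
            rw [hm']
            show (if pvKey m > pvAVal d then ((true : Bool), some (pvAVal d), i)
                  else pvG (some m)) = pvG (some (i, d))
            rw [if_pos hlt']
            rfl
          have hms : pvMinStep pvKey (some m) (i, d) = some (i, d) := by
            simp [pvMinStep, hlt]
          rw [List.foldl_cons, hs, ih (some (i, d)), List.foldl_cons, hms]
        · have hlt' : ¬ (pvKey m > pvAVal d) := hlt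
          have hs : pvAStep ts (pvG (some m)) (i, d) = pvG (some m) := by
            unfold pvAStep
            rw [hm']
            show (if pvKey m > pvAVal d then ((true : Bool), some (pvAVal d), i)
                  else pvG (some m)) = pvG (some m)
            rw [if_neg hlt']
          have hms : pvMinStep pvKey (some m) (i, d) = some m := by
            simp [pvMinStep, hlt]
          rw [List.foldl_cons, hs, ih (some m), List.foldl_cons, hms]
    · have hmf : PySem.Str.isIn ts d = false := eq_false_of_ne_true hm
      have hm' : (PySem.Str.isIn ts d || PySem.Str.isIn (ts ++ "s") d) = false := by
        rw [pvMatchEq]; exact hmf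
      have hf : ((i, d) :: t).filter (fun p => PySem.Str.isIn ts p.2) =
          t.filter (fun p => PySem.Str.isIn ts p.2) := by
        simp only [List.filter_cons]; rw [hmf]; rfl
      have hs : pvAStep ts (pvG acc) (i, d) = pvG acc := by
        unfold pvAStep; rw [hm']; rfl
      rw [hf, List.foldl_cons, hs]
      exact ih acc

-- A as "first unit whose filtered matches are non-empty, then first-min by value"
def pvUnitLoop (times : List String) : List String → Int
  | [] => -1
  | u :: rest =>
    match PySem.List.min?
        ((PySem.List.enumerate times).filter (fun p => PySem.Str.isIn u p.2)) pvKey with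
    | some m => m.1
    | none => pvUnitLoop times rest

theorem pvOuter (times : List String) :
    ∀ units, pvALoop times units (false, none, -1) = pvUnitLoop times units := by
  intro units
  induction units with
  | nil => rfl
  | cons u rest ih =>
    have h := pvInner_gen u (PySem.List.enumerate times) none
    have hmin : PySem.List.min?
        ((PySem.List.enumerate times).filter (fun p => PySem.Str.isIn u p.2)) pvKey =
        ((PySem.List.enumerate times).filter (fun p => PySem.Str.isIn u p.2)).foldl
          (pvMinStep pvKey) none := by
      unfold PySem.List.min?
      exact List.foldl_ext _ _ _ (fun acc x _ => by cases acc <;> rfl)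
    rw [pvALoop, pvUnitLoop]
    simp only [pvG] at h
    rw [h, hmin]
    cases hc : ((PySem.List.enumerate times).filter (fun p => PySem.Str.isIn u p.2)).foldl
        (pvMinStep pvKey) none with
    | none => simpa [pvG] using ih
    | some m => simp

-- ---- rank machinery for B ----

-- recursion form of B's rank: first index of a unit contained in d, else the list length
def pvRk : List String → String → Int
  | [], _ => 0
  | u :: rest, d => if PySem.Str.isIn u d then 0 else pvRk rest d + 1

theorem pvRk_nonneg (us : List String) (d : String) : 0 ≤ pvRk us d := by
  induction us with
  | nil => simp [pvRk]
  | cons u rest ih => simp only [pvRk]; split_ifs <;> omega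

theorem pvRk_eq_zero_iff (u : String) (rest : List String) (d : String) :
    pvRk (u :: rest) d = 0 ↔ PySem.Str.isIn u d = true := by
  simp only [pvRk]
  split_ifs with h
  · exact iff_of_true rfl h
  · have := pvRk_nonneg rest d
    constructor
    · intro hz; omega
    · intro hc; exact absurd hc h

-- B's find?-over-enumerate rank equals the recursion, at any start offset
theorem pvFind_rank (us : List String) (d : String) :
    ∀ s : Int,
      ((((PySem.List.enumerate us s).find? (fun p => PySem.Str.isIn p.2 d)).map
          (fun p => p.1)).getD (s + us.length)) = s + pvRk us d := by
  induction us with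
  | nil => intro s; simp [PySem.List.enumerate, pvRk]
  | cons u rest ih =>
    intro s
    rw [PySem.List.enumerate_cons]
    by_cases h : PySem.Str.isIn u d = true
    · have hc : PySem.Chars.isIn u.toList d.toList = true := by simpa using h
      simp [List.find?_cons, hc, pvRk, h]
    · have h' : PySem.Str.isIn u d = false := eq_false_of_ne_true h
      have hc' : PySem.Chars.isIn u.toList d.toList = false := by simpa using h'
      simp only [List.find?_cons, hc', h', pvRk, List.length_cons]
      have := ih (s + 1)
      push_cast
      push_cast at this
      calc ((((PySem.List.enumerate rest (s + 1)).find? (fun p => PySem.Str.isIn p.2 d)).map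
            (fun p => p.1)).getD (s + ((rest.length : Int) + 1)))
          = ((((PySem.List.enumerate rest (s + 1)).find? (fun p => PySem.Str.isIn p.2 d)).map
            (fun p => p.1)).getD ((s + 1) + (rest.length : Int))) := by ring_nf
        _ = (s + 1) + pvRk rest d := this
        _ = s + (pvRk rest d + 1) := by ring

theorem pvRank_eq (d : String) : pvRank d = pvRk ["sec", "min", "hour", "day", "week", "month"] d := by
  have h := pvFind_rank ["sec", "min", "hour", "day", "week", "month"] d 0
  simpa [pvRank] using h

-- min? commutes with map (the key only looks through the map)
theorem pvMin?_map {α β : Type} (g : α → β) (key : β → Int) (l : List α) :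
    PySem.List.min? (l.map g) key = (PySem.List.min? l (fun a => key (g a))).map g := by
  unfold PySem.List.min?
  suffices h : ∀ acc : Option α,
      (l.map g).foldl
          (fun acc x => match acc with
            | none => some x
            | some m => if key x < key m then some x else some m) (acc.map g) =
        (l.foldl
          (fun acc x => match acc with
            | none => some x
            | some m => if key (g x) < key (g m) then some x else some m) acc).map g by
    simpa using h none
  induction l with
  | nil => intro acc; rfl
  | cons x t ih =>
    intro acc
    cases acc with
    | none => simpa using ih (some x)
    | some m =>
      simp only [List.map_cons, List.foldl_cons]
      by_cases hlt : key (g x) < key (g m)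
      · simpa [hlt] using ih (some x)
      · simpa [hlt] using ih (some m)

-- min? is invariant under shifting the key by a constant
theorem pvMin?_key_shift {α : Type} (l : List α) (k : α → Int) (c : Int) :
    PySem.List.min? l (fun a => k a + c) = PySem.List.min? l k := by
  unfold PySem.List.min?
  suffices h : ∀ acc : Option α,
      l.foldl (fun acc x => match acc with
        | none => some x
        | some m => if k x + c < k m + c then some x else some m) acc =
      l.foldl (fun acc x => match acc with
        | none => some x
        | some m => if k x < k m then some x else some m) acc by
    exact h none
  induction l with
  | nil => intro acc; rfl
  | cons x t ih =>
    intro acc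
    cases acc with
    | none => exact ih (some x)
    | some m =>
      simp only [List.foldl_cons]
      have : (k x + c < k m + c) ↔ (k x < k m) := by omega
      by_cases hlt : k x < k m
      · rw [if_pos (this.2 hlt), if_pos hlt]; exact ih (some x)
      · rw [if_neg (fun hc => hlt (this.1 hc)), if_neg hlt]; exact ih (some m)

-- the generic rank-based program (B with the unit list abstracted)
def pvGen (us times : List String) : Int :=
  let ranks := times.map (pvRk us)
  let top := PySem.List.minD ranks (fun r => r) us.length
  if top == (us.length : Int) then -1
  else
    match PySem.List.min?
        ((PySem.List.enumerate times).filter (fun p => pvRk us p.2 == top)) pvKey with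
    | some m => m.1
    | none => -1

-- value of minD over the ranks: it is a rank and a lower bound of all ranks
theorem pvMinD_spec (ranks : List Int) (dflt : Int) :
    (ranks = [] ∧ PySem.List.minD ranks (fun r => r) dflt = dflt) ∨
    (PySem.List.minD ranks (fun r => r) dflt ∈ ranks ∧
      ∀ y ∈ ranks, PySem.List.minD ranks (fun r => r) dflt ≤ y) := by
  unfold PySem.List.minD
  cases hm : PySem.List.min? ranks (fun r => r) with
  | none => exact Or.inl ⟨(PySem.List.min?_eq_none_iff _ _).1 hm, rfl⟩
  | some m =>
    refine Or.inr ⟨PySem.List.min?_mem hm, ?_⟩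
    intro y hy
    exact PySem.List.min?_isMin hm y hy

theorem pvUnit_eq_gen (times : List String) :
    ∀ us, pvUnitLoop times us = pvGen us times := by
  intro us
  induction us with
  | nil =>
    rw [pvUnitLoop, pvGen]
    simp only [List.length_nil, Nat.cast_zero]
    have h : ∀ r ∈ times.map (pvRk []), r = 0 := by
      intro r hr
      obtain ⟨d, _, rfl⟩ := List.mem_map.1 hr
      rfl
    rcases pvMinD_spec (times.map (pvRk [])) 0 with ⟨_, he⟩ | ⟨hmem, _⟩
    · simp [he]
    · simp [h _ hmem]
  | cons u rest ih =>
    by_cases hex : ∃ d ∈ times, PySem.Str.isIn u d = true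
    · -- some date matches u: top = 0, rank-0 dates are exactly the u-matches
      obtain ⟨d0, hd0, hm0⟩ := hex
      have hr0 : (0 : Int) ∈ times.map (pvRk (u :: rest)) :=
        List.mem_map.2 ⟨d0, hd0, (pvRk_eq_zero_iff u rest d0).2 hm0⟩
      have htop : PySem.List.minD (times.map (pvRk (u :: rest))) (fun r => r)
          ((u :: rest).length) = 0 := by
        rcases pvMinD_spec (times.map (pvRk (u :: rest))) ((u :: rest).length) with
          ⟨he, _⟩ | ⟨hmem, hlb⟩
        · rw [he] at hr0; exact absurd hr0 (List.not_mem_nil)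
        · obtain ⟨d, _, hde⟩ := List.mem_map.1 hmem
          have h1 := hlb 0 hr0
          have h2 := pvRk_nonneg (u :: rest) d
          rw [← hde]
          linarith
      have hne : ((u :: rest).length : Int) ≠ 0 := by
        simp only [List.length_cons]; push_cast; omega
      rw [pvUnitLoop, pvGen]
      simp only [htop]
      rw [if_neg (by simpa using fun hc => hne (by omega))]
      have hfe : (PySem.List.enumerate times).filter (fun p => pvRk (u :: rest) p.2 == (0 : Int)) =
          (PySem.List.enumerate times).filter (fun p => PySem.Str.isIn u p.2) := by
        apply List.filter_congr
        intro p _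
        by_cases h : PySem.Str.isIn u p.2 = true
        · have hch : PySem.Chars.isIn u.toList p.2.toList = true := by simpa using h
          simp [hch, (pvRk_eq_zero_iff u rest p.2).2 h]
        · have hne0 : pvRk (u :: rest) p.2 ≠ 0 := fun hc => h ((pvRk_eq_zero_iff u rest p.2).1 hc)
          have hch : PySem.Chars.isIn u.toList p.2.toList = false := by
            simpa using eq_false_of_ne_true h
          simp [hne0, hch]
      rw [hfe]
      cases hc : PySem.List.min?
          ((PySem.List.enumerate times).filter (fun p => PySem.Str.isIn u p.2)) pvKey with
      | none =>
        -- impossible: d0 matches, so the filtered list is non-empty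
        exfalso
        have hnil := (PySem.List.min?_eq_none_iff _ _).1 hc
        obtain ⟨k, hk, hpd⟩ : ∃ (k : Nat) (h : k < times.length), times[k] = d0 :=
          List.mem_iff_getElem.1 hd0
        have hpmem : ((k : Int), d0) ∈ PySem.List.enumerate times := by
          rw [PySem.List.mem_enumerate_iff]
          exact ⟨k, hk, by simp [hpd]⟩
        have : ((k : Int), d0) ∈ (PySem.List.enumerate times).filter
            (fun p => PySem.Str.isIn u p.2) := List.mem_filter.2 ⟨hpmem, hm0⟩
        rw [hnil] at this
        exact absurd this (List.not_mem_nil)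
      | some m => rfl
    · -- no date matches u: every rank shifts by one and the whole computation defers to rest
      have hnm : ∀ d ∈ times, PySem.Str.isIn u d = false := by
        intro d hd
        cases h : PySem.Str.isIn u d with
        | true => exact absurd ⟨d, hd, h⟩ hex
        | false => rfl
      have hshift : times.map (pvRk (u :: rest)) = (times.map (pvRk rest)).map (· + 1) := by
        rw [List.map_map]
        apply List.map_congr_left
        intro d hd
        simp only [Function.comp_apply, pvRk, hnm d hd]
        simp
      -- minD over shifted ranks = minD over ranks + 1
      have hminshift : PySem.List.minD (times.map (pvRk (u :: rest))) (fun r => r)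
            ((u :: rest).length) =
          PySem.List.minD (times.map (pvRk rest)) (fun r => r) (rest.length) + 1 := by
        rw [hshift]
        unfold PySem.List.minD
        rw [pvMin?_map (fun r => r + 1) (fun r => r) (times.map (pvRk rest))]
        rw [pvMin?_key_shift (times.map (pvRk rest)) (fun r => r) 1]
        cases hmm : PySem.List.min? (times.map (pvRk rest)) (fun r => r) with
        | none => simp [List.length_cons]
        | some m => simp
      rw [pvUnitLoop, pvGen]
      have hfnil : (PySem.List.enumerate times).filter (fun p => PySem.Str.isIn u p.2) = [] := by
        apply List.filter_eq_nil_iff.2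
        intro p hp
        obtain ⟨k, hk, rfl⟩ := (PySem.List.mem_enumerate_iff _ _ _).1 hp
        simpa using hnm _ (List.getElem_mem hk)
      rw [hfnil]
      have hmn : PySem.List.min? ([] : List (Int × String)) pvKey = none := rfl
      rw [hmn]
      rw [ih, pvGen]
      simp only [hminshift]
      set tr := PySem.List.minD (times.map (pvRk rest)) (fun r => r) (rest.length) with htr
      have hlen : ((u :: rest).length : Int) = (rest.length : Int) + 1 := by
        simp [List.length_cons]
      by_cases hend : tr = (rest.length : Int)
      · rw [if_pos (by simp [hend]), if_pos (by simp [hend, hlen])]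
      · rw [if_neg (by simp [hend]), if_neg (by simpa [hlen] using fun hc => hend (by omega))]
        have hfe : (PySem.List.enumerate times).filter (fun p => pvRk (u :: rest) p.2 == tr + 1) =
            (PySem.List.enumerate times).filter (fun p => pvRk rest p.2 == tr) := by
          apply List.filter_congr
          intro p hp
          obtain ⟨k, hk, rfl⟩ := (PySem.List.mem_enumerate_iff _ _ _).1 hp
          simp only [pvRk, hnm _ (List.getElem_mem hk)]
          simp only [Bool.false_eq_true, if_false]
          by_cases h : pvRk rest times[k] = tr
          · simp [h]
          · have h1 : ¬ (pvRk rest times[k] + 1 = tr + 1) := fun hc => h (by linarith)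
            simp [h, h1]
        rw [hfe]
  -- done

-- B's port equals the generic rank program at the concrete unit list
theorem pvAlt_eq_gen (times : List String) :
    time_comparison_alt times = pvGen ["sec", "min", "hour", "day", "week", "month"] times := by
  unfold time_comparison_alt pvGen
  have hrk : times.map pvRank = times.map (pvRk ["sec", "min", "hour", "day", "week", "month"]) :=
    List.map_congr_left (fun d _ => pvRank_eq d)
  rw [hrk]
  have hlen6 : ((["sec", "min", "hour", "day", "week", "month"] : List String).length : Int) = 6 := by
    norm_num
  rw [hlen6]
  set ranks := times.map (pvRk ["sec", "min", "hour", "day", "week", "month"]) with hr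
  set top := PySem.List.minD ranks (fun r => r) 6 with ht
  by_cases htop : top = (6 : Int)
  · rw [if_pos (by simp only [beq_iff_eq]; rw [← ht]; exact htop),
        if_pos (by simp only [beq_iff_eq]; rw [← ht]; exact htop)]
  · rw [if_neg (by simp only [beq_iff_eq]; rw [← ht]; exact htop),
        if_neg (by simp only [beq_iff_eq]; rw [← ht]; exact htop)]
    -- bridge: index loop over pyRange + pyGetD ↔ filter over enumerate
    have henum := PySem.List.enumerate_eq_map_pyRange times ""
    have hget : ∀ i : Int, PySem.List.pyGetD ranks i 6 =
        pvRk ["sec", "min", "hour", "day", "week", "month"] (PySem.List.pyGetD times i "") := by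
      intro i
      have h6 : (6 : Int) = pvRk ["sec", "min", "hour", "day", "week", "month"] "" := by decide
      rw [hr, h6, PySem.List.pyGetD_map]
    have hkey : ∀ i : Int, pvBKey times i = pvKey (i, PySem.List.pyGetD times i "") := by
      intro i; rfl
    rw [henum, List.filter_map]
    rw [pvMin?_map (fun j => (j, PySem.List.pyGetD times j "")) pvKey]
    have hfe : (PySem.List.pyRange 0 (PySem.List.len times) 1).filter
          ((fun p => pvRk ["sec", "min", "hour", "day", "week", "month"] p.2 == top) ∘
            (fun j => (j, PySem.List.pyGetD times j ""))) =
        (PySem.List.pyRange 0 (PySem.List.len times) 1).filter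
          (fun i => PySem.List.pyGetD ranks i 6 == top) := by
      apply List.filter_congr
      intro i _
      simp only [Function.comp_apply, hget i]
    rw [hfe]
    have hkeq : PySem.List.min?
          ((PySem.List.pyRange 0 (PySem.List.len times) 1).filter
            (fun i => PySem.List.pyGetD ranks i 6 == top)) (pvBKey times) =
        PySem.List.min?
          ((PySem.List.pyRange 0 (PySem.List.len times) 1).filter
            (fun i => PySem.List.pyGetD ranks i 6 == top))
          (fun i => pvKey (i, PySem.List.pyGetD times i "")) := by
      rfl
    rw [hkeq]
    cases hc : PySem.List.min?
        ((PySem.List.pyRange 0 (PySem.List.len times) 1).filter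
          (fun i => PySem.List.pyGetD ranks i 6 == top))
        (fun i => pvKey (i, PySem.List.pyGetD times i "")) with
    | none => rfl
    | some i => rfl

-- ===== VERDICT (by name: the statement is the Claim_ definition above) =====
theorem time_comparison_spec : Claim_equal_time_comparison := by
  intro times _ _
  unfold Spec_time_comparison time_comparison
  rw [pvOuter times, pvUnit_eq_gen times, pvAlt_eq_gen times]
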